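-- pv_equiv track=rewrite | github.com/alicezee/USACO-training | transformations.py | ninety
-- ===== SOURCE A (Python) =====
-- def ninety(before, after, size):
--     changed = [[0 for x in range(size)] for y in range(size)]
--     for i in range(size):
--         for j in range(size):
--             changed[j][size-1-i] = before[i][j]
--     if after == changed:
--         return True
--     else:
--         return False
-- ===== SOURCE B (Python) =====
-- def ninety(before, after, size):
--     n = max(size, 0)
--     if len(after) != n or any(len(row) != n for row in after):
--         return False
--     return all(after[j][n - 1 - i] == before[i][j]
--                for i in range(n) for j in range(n))
-- ===== Notes on version B (the rewrite author's own statement) =====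
-- stated objective: simpler
-- what changed: Instead of materialising the full rotated matrix and comparing it to `after`, B checks `after`'s shape and then verifies each entry after[j][n-1-i] == before[i][j] in one fused pass with no intermediate structure.
import Mathlib
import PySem

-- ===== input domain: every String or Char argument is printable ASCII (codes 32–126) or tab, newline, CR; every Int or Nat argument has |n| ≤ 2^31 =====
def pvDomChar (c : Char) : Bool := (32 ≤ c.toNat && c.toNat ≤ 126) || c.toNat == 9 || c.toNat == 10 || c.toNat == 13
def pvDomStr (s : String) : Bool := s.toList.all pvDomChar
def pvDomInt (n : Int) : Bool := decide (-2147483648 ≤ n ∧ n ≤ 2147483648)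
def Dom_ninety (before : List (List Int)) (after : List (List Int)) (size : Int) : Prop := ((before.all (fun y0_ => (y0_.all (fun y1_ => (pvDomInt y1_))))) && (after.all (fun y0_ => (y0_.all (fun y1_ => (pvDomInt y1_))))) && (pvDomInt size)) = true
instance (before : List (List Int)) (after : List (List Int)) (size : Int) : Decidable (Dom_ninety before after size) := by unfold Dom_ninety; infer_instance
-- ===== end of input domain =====

-- B replaces "build the rotated matrix, then compare" by a shape check plus a single
-- fused entrywise verification pass (same asymptotics, no intermediate matrix).


-- ===== PORT A =====
-- Literal transliteration of A: build `changed`, write before[i][j] into changed[j][size-1-i],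
-- compare.  pyGetD/pySetD are exact here because Pre_ninety puts every index in range
-- (and for indices into `changed` the loop bounds themselves keep them in range).
def ninety (before : List (List Int)) (after : List (List Int)) (size : Int) : Bool :=
  let changed : List (List Int) :=
    (PySem.List.pyRange 0 size 1).map (fun _y =>
      (PySem.List.pyRange 0 size 1).map (fun _x => (0 : Int)))
  let changed :=
    (PySem.List.pyRange 0 size 1).foldl (fun ch i =>
      (PySem.List.pyRange 0 size 1).foldl (fun ch j =>
        PySem.List.pySetD ch j
          (PySem.List.pySetD (PySem.List.pyGetD ch j []) (size - 1 - i)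
            (PySem.List.pyGetD (PySem.List.pyGetD before i []) j 0))) ch) changed
  after == changed

-- ===== PORT B =====
-- Transliteration of Source B.  All indices are nonnegative and in range (after's by the shape
-- check, before's by Pre_ninety), so Nat-indexed getD is exact for Python's indexing here.
def ninety_alt (before : List (List Int)) (after : List (List Int)) (size : Int) : Bool :=
  let n : Nat := size.toNat   -- max(size, 0)
  if after.length == n && after.all (fun row => row.length == n) then
    (List.range n).all (fun i => (List.range n).all (fun j =>
      (after.getD j []).getD (n - 1 - i) 0 == (before.getD i []).getD j 0))
  else
    false

-- ===== PRECONDITION & SPEC =====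
-- Pre_ excludes exactly the inputs where A raises IndexError: `before` must have at least
-- `size` rows and each of its first `size` rows at least `size` entries.
def Pre_ninety (before : List (List Int)) (after : List (List Int)) (size : Int) : Prop :=
  size ≤ (before.length : Int) ∧ ∀ row ∈ before.take size.toNat, size ≤ (row.length : Int)
instance (before : List (List Int)) (after : List (List Int)) (size : Int) : Decidable (Pre_ninety before after size) := by unfold Pre_ninety; infer_instance

def pvWitness_ninety : List (List Int) × List (List Int) × Int :=
  ([[1, 2], [3, 4]], [[3, 1], [4, 2]], 2)

def Spec_ninety (before : List (List Int)) (after : List (List Int)) (size : Int) (out : Bool) : Prop := out = ninety_alt before after size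
instance (before : List (List Int)) (after : List (List Int)) (size : Int) (out : Bool) : Decidable (Spec_ninety before after size out) := by unfold Spec_ninety; infer_instance

-- ===== CLAIM (what is proved, stated in full; the proofs are below) =====
def Claim_equal_ninety : Prop := ∀ (before : List (List Int)) (after : List (List Int)) (size : Int), Dom_ninety before after size → Pre_ninety before after size → Spec_ninety before after size (ninety before after size)


-- ===== LEMMAS AND PROOFS =====

-- the entry before[i][j] (with defaults; in range under Pre_)
def pvG (before : List (List Int)) (i j : Nat) : Int := (before.getD i []).getD j 0

-- one update step: s[j] = f j s[j]
def pvStep (f : Nat → List Int → List Int) (s : List (List Int)) (j : Nat) : List (List Int) :=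
  s.set j (f j (s.getD j []))

-- one inner loop of A, in Nat form
def pvInner (n : Nat) (g : Nat → Nat → Int) (i : Nat) (ch : List (List Int)) : List (List Int) :=
  (List.range n).foldl (pvStep (fun j row => row.set (n - 1 - i) (g i j))) ch

-- intermediate state of A's outer loop after m iterations
def pvE (n : Nat) (g : Nat → Nat → Int) (m : Nat) : List (List Int) :=
  (List.range n).map (fun r => (List.range n).map (fun c =>
    if n - m ≤ c then g (n - 1 - c) r else 0))

theorem pvFoldlSet_length (f : Nat → List Int → List Int) (m : Nat) (ch : List (List Int)) :
    ((List.range m).foldl (pvStep f) ch).length = ch.length := by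
  induction m generalizing ch with
  | zero => simp
  | succ m ih => rw [List.range_succ, List.foldl_append, List.foldl_cons, List.foldl_nil,
      pvStep, List.length_set, ih]

theorem pvFoldlSet_getElem? (f : Nat → List Int → List Int) (m : Nat) (ch : List (List Int)) (k : Nat) :
    ((List.range m).foldl (pvStep f) ch)[k]? =
      if k < m then (ch[k]?).map (f k) else ch[k]? := by
  induction m generalizing k with
  | zero => simp
  | succ m ih =>
    rw [List.range_succ, List.foldl_append, List.foldl_cons, List.foldl_nil]
    have hm : ((List.range m).foldl (pvStep f) ch)[m]? = ch[m]? := by rw [ih]; simp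
    have hlen : ((List.range m).foldl (pvStep f) ch).length = ch.length := pvFoldlSet_length f m ch
    rw [pvStep, List.getElem?_set]
    by_cases hkm : m = k
    · subst hkm
      rw [if_pos rfl, if_pos (Nat.lt_succ_self m), hlen, List.getD_eq_getElem?_getD, hm]
      by_cases hml : m < ch.length
      · rw [if_pos hml, List.getElem?_eq_getElem hml]; simp
      · rw [if_neg hml, List.getElem?_eq_none (by omega)]; simp
    · rw [if_neg hkm, ih]
      by_cases hk : k < m
      · rw [if_pos hk, if_pos (by omega)]
      · rw [if_neg hk, if_neg (by omega)]

theorem pvInner_map (n : Nat) (g : Nat → Nat → Int) (i : Nat) (f : Nat → List Int) :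
    pvInner n g i ((List.range n).map f) =
      (List.range n).map (fun r => (f r).set (n - 1 - i) (g i r)) := by
  apply List.ext_getElem?
  intro k
  rw [pvInner, pvFoldlSet_getElem?]
  by_cases hk : k < n
  · simp [hk]
  · have h1 : ((List.range n).map f)[k]? = none := List.getElem?_eq_none (by simpa using hk)
    have h2 : ((List.range n).map (fun r => (f r).set (n - 1 - i) (g i r)))[k]? = none :=
      List.getElem?_eq_none (by simpa using hk)
    rw [if_neg hk, h1, h2]

theorem pvSet_range_map (n c : Nat) (hc : c < n) (u : Nat → Int) (v : Int) :
    ((List.range n).map u).set c v = (List.range n).map (fun x => if x = c then v else u x) := by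
  apply List.ext_getElem
  · simp
  · intro k h1 h2
    simp only [List.length_set, List.length_map, List.length_range] at h1
    rw [List.getElem_set]
    by_cases hkc : c = k
    · subst hkc; simp
    · have hne : k ≠ c := fun h => hkc h.symm
      simp [hkc, hne]

theorem pvOuter_char (n : Nat) (g : Nat → Nat → Int) (m : Nat) (hm : m ≤ n) :
    (List.range m).foldl (fun ch i => pvInner n g i ch)
        ((List.range n).map (fun _ => (List.range n).map (fun _ => (0 : Int)))) =
      pvE n g m := by
  induction m with
  | zero =>
    simp only [List.range_zero, List.foldl_nil, pvE]
    apply List.map_congr_left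
    intro r _
    apply List.map_congr_left
    intro c hc
    rw [List.mem_range] at hc
    rw [if_neg (by omega)]
  | succ m ih =>
    rw [List.range_succ, List.foldl_append, List.foldl_cons, List.foldl_nil,
      ih (by omega), pvE, pvInner_map]
    rw [pvE]
    apply List.map_congr_left
    intro r _
    rw [pvSet_range_map n (n - 1 - m) (by omega)]
    apply List.map_congr_left
    intro c hc
    rw [List.mem_range] at hc
    by_cases hcm : c = n - 1 - m
    · rw [if_pos hcm, if_pos (by omega)]
      have h2 : n - 1 - c = m := by omega
      rw [h2]
    · rw [if_neg hcm]
      by_cases h1 : n - m ≤ c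
      · rw [if_pos h1, if_pos (by omega)]
      · rw [if_neg h1, if_neg (by omega)]


theorem pvGetD_range_map {a : Type} (d : a) (u : Nat → a) (n j : Nat) (hj : j < n) :
    ((List.range n).map u).getD j d = u j := by
  rw [List.getD_eq_getElem?_getD, List.getElem?_map, List.getElem?_range hj]
  rfl

theorem pvE_iff (after : List (List Int)) (n : Nat) (g : Nat → Nat → Int) :
    after = pvE n g n ↔
      (after.length = n ∧ (∀ row ∈ after, row.length = n) ∧
        ∀ i < n, ∀ j < n, (after.getD j []).getD (n - 1 - i) 0 = g i j) := by
  constructor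
  · intro h
    subst h
    refine ⟨by simp [pvE], ?_, ?_⟩
    · intro row hrow
      rw [pvE, List.mem_map] at hrow
      obtain ⟨r, _, hr⟩ := hrow
      simp [← hr]
    · intro i hi j hj
      have hc : n - 1 - i < n := by omega
      rw [pvE, pvGetD_range_map _ _ _ _ hj, pvGetD_range_map _ _ _ _ hc,
        if_pos (by omega)]
      have h2 : n - 1 - (n - 1 - i) = i := by omega
      rw [h2]
  · rintro ⟨h1, h2, h3⟩
    apply List.ext_getElem
    · simp [pvE, h1]
    · intro r hr1 hr2
      have hrn : r < n := by omega
      have hlen : after[r].length = n := h2 _ (List.getElem_mem hr1)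
      apply List.ext_getElem
      · simp [pvE, hlen, List.getElem_map, List.getElem_range]
      · intro c hc1 hc2
        have hcn : c < n := by omega
        have h4 := h3 (n - 1 - c) (by omega) r hrn
        have h5 : n - 1 - (n - 1 - c) = c := by omega
        rw [h5] at h4
        have hrow : after.getD r [] = after[r] := by
          rw [List.getD_eq_getElem?_getD, List.getElem?_eq_getElem hr1]
          rfl
        rw [hrow, List.getD_eq_getElem?_getD, List.getElem?_eq_getElem hc1,
          Option.getD_some] at h4
        rw [h4]
        simp only [pvE, List.getElem_map, List.getElem_range]
        rw [if_pos (by omega)]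

-- ===== VERDICT (by name: the statement is the Claim_ definition above) =====
theorem ninety_spec : Claim_equal_ninety := by
  intro before after size _hdom hpre
  show ninety before after size = ninety_alt before after size
  by_cases hs : size ≤ 0
  · have hn : size.toNat = 0 := by omega
    rw [ninety, ninety_alt, PySem.List.pyRange_one_eq_nil hs, hn]
    cases after <;> simp
  · have hn : size = (size.toNat : Int) := by omega
    have hA : ninety before after size = (after == pvE size.toNat (pvG before) size.toNat) := by
      rw [ninety, hn, PySem.List.pyRange_one]
      simp only [Int.sub_zero, Int.toNat_natCast, zero_add, List.foldl_map, List.map_map,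
        Function.comp_def, PySem.List.pySetD_natCast, PySem.List.pyGetD_natCast]
      congr 1
      have hcong : ∀ (acc : List (List Int)), ∀ i ∈ List.range size.toNat,
          (List.range size.toNat).foldl
            (fun s j => s.set j
              (PySem.List.pySetD (s.getD j []) ((size.toNat : Int) - 1 - (i : Int))
                ((before.getD i []).getD j 0))) acc
            = pvInner size.toNat (pvG before) i acc := by
        intro acc i hi
        rw [List.mem_range] at hi
        have h0 : (0 : Int) ≤ (size.toNat : Int) - 1 - (i : Int) := by omega
        simp only [fun (xs : List Int) (v : Int) => PySem.List.pySetD_of_nonneg xs v h0]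
        have h1 : ((size.toNat : Int) - 1 - (i : Int)).toNat = size.toNat - 1 - i := by omega
        simp only [h1]
        rfl
      exact Eq.trans (PySem.List.foldl_congr_mem _ _ _ _ hcong)
        (pvOuter_char size.toNat (pvG before) size.toNat le_rfl)
    rw [hA, ninety_alt]
    apply Bool.eq_iff_iff.2
    rw [beq_iff_eq, pvE_iff]
    by_cases hsh : after.length = size.toNat ∧ ∀ row ∈ after, row.length = size.toNat
    · have hb1 : (after.length == size.toNat) = true := by simpa using hsh.1
      have hb2 : (after.all fun row => row.length == size.toNat) = true := by
        rw [List.all_eq_true]; intro row hrow; simpa using hsh.2 row hrow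
      simp only [hb1, hb2, Bool.and_self, if_pos]
      constructor
      · rintro ⟨-, -, h3⟩
        rw [List.all_eq_true]
        intro i hi
        rw [List.all_eq_true]
        intro j hj
        rw [List.mem_range] at hi hj
        simpa using h3 i hi j hj
      · intro h
        refine ⟨hsh.1, hsh.2, ?_⟩
        intro i hi j hj
        rw [List.all_eq_true] at h
        have := h i (List.mem_range.2 hi)
        rw [List.all_eq_true] at this
        simpa using this j (List.mem_range.2 hj)
    · have hb : (after.length == size.toNat && after.all fun row => row.length == size.toNat) = false := by
        rw [Bool.and_eq_false_iff]
        by_cases h1 : after.length = size.toNat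
        · right
          rw [← Bool.not_eq_true, List.all_eq_true]
          intro hall
          exact hsh ⟨h1, fun row hrow => by simpa using hall row hrow⟩
        · left; simpa using h1
      rw [hb, if_neg (by simp)]
      simp only [Bool.false_eq_true, iff_false]
      rintro ⟨h1, h2, -⟩
      exact hsh ⟨h1, h2⟩
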